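-- pv_equiv track=rewrite | github.com/dsmilab/Taiko-Master | util/taiko/tools/score.py | get_processing_score
-- ===== SOURCE A (Python) =====
-- def get_processing_score(pred_score_list):
--     score = 0
--
--     broken = False
--     leading_space = True
--
--     for d in pred_score_list:
--         if d == 10:
--             d = 0
--             if not leading_space:
--                 broken = True
--         else:
--             leading_space = False
--         score = score * 10 + d
--
--     if broken or leading_space:
--         return None
--
--     return score
-- ===== SOURCE B (Python) =====
-- def get_processing_score(pred_score_list):
--     digits = list(pred_score_list)
--     # skip the leading 10s ("spaces"); they only contribute leading zeros in A
--     i = 0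
--     while i < len(digits) and digits[i] == 10:
--         i += 1
--     rest = digits[i:]
--     if not rest:          # empty or all 10s: A's leading_space case
--         return None
--     if 10 in rest:        # a 10 after a real digit: A's broken case
--         return None
--     score = 0
--     for d in rest:
--         score = score * 10 + d
--     return score
-- ===== Notes on version B (the rewrite author's own statement) =====
-- stated objective: simpler
-- what changed: B drops the leading-10 prefix first, then returns None iff the remainder is empty or still contains a 10, and only then accumulates score*10+d over the remainder, instead of A's single fold threading broken/leading_space flags and zero-substituted digits.
import Mathlib
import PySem

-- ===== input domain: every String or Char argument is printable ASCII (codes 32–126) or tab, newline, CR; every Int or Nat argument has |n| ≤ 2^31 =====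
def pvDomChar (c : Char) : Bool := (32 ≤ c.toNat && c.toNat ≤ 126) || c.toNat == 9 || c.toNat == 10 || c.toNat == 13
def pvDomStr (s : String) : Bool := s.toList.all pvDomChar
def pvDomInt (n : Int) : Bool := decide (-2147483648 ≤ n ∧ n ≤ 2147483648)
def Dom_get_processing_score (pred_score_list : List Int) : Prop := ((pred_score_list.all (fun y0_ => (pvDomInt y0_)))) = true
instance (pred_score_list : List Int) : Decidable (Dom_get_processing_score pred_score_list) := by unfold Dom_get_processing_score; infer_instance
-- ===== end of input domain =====

-- B replaces A's one fold with broken/leading_space flags by: drop the leading-10 prefix,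
-- return none iff the remainder is empty or contains a 10, else fold score*10+d over it (simpler).

-- ===== PORT A =====
-- state = (score, broken, leading_space), exactly A's loop
def get_processing_score (pred_score_list : List Int) : Option Int :=
  let st := pred_score_list.foldl
    (fun (st : Int × Bool × Bool) d =>
      let score := st.1
      let broken := st.2.1
      let leading_space := st.2.2
      if d = 10 then
        (score * 10 + 0, (if leading_space then broken else true), leading_space)
      else
        (score * 10 + d, broken, false))
    (0, false, true)
  if st.2.1 || st.2.2 then none else some st.1

-- ===== PORT B =====
-- B's while loop dropping leading 10s
def pvDropLeading10 : List Int → List Int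
  | [] => []
  | d :: t => if d = 10 then pvDropLeading10 t else d :: t

def get_processing_score_alt (pred_score_list : List Int) : Option Int :=
  let rest := pvDropLeading10 pred_score_list
  if rest = [] then none
  else if 10 ∈ rest then none
  else some (rest.foldl (fun score d => score * 10 + d) 0)

-- ===== PRECONDITION & SPEC =====
def Spec_get_processing_score (pred_score_list : List Int) (out : Option Int) : Prop := out = get_processing_score_alt pred_score_list
instance (pred_score_list : List Int) (out : Option Int) : Decidable (Spec_get_processing_score pred_score_list out) := by unfold Spec_get_processing_score; infer_instance

-- ===== CLAIM (what is proved, stated in full; the proofs are below) =====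
def Claim_equal_get_processing_score : Prop := ∀ (pred_score_list : List Int), Dom_get_processing_score pred_score_list → Spec_get_processing_score pred_score_list (get_processing_score pred_score_list)

-- ===== LEMMAS AND PROOFS =====

def pvStepA (st : Int × Bool × Bool) (d : Int) : Int × Bool × Bool :=
  if d = 10 then
    (st.1 * 10 + 0, (if st.2.2 then st.2.1 else true), st.2.2)
  else
    (st.1 * 10 + d, st.2.1, false)

theorem get_processing_score_eq_foldl (l : List Int) :
    get_processing_score l =
      (let st := l.foldl pvStepA (0, false, true)
       if st.2.1 || st.2.2 then none else some st.1) := by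
  rfl

-- after leading_space has been cleared: score folds, broken records whether a 10 occurs
theorem phase2 (l : List Int) : ∀ (s : Int) (b : Bool),
    l.foldl pvStepA (s, b, false) =
      (l.foldl (fun score d => score * 10 + (if d = 10 then 0 else d)) s,
       b || decide (10 ∈ l), false) := by
  induction l with
  | nil => simp
  | cons d t ih =>
    intro s b
    by_cases h : d = 10
    · simp [pvStepA, h, ih]
    · simp [pvStepA, h, Ne.symm h, ih]

-- over a 10-free list the zero-substituting fold is the plain fold
theorem foldl_no10 (l : List Int) (h : 10 ∉ l) : ∀ (s : Int),
    l.foldl (fun score d => score * 10 + (if d = 10 then 0 else d)) s =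
      l.foldl (fun score d => score * 10 + d) s := by
  induction l with
  | nil => intro s; rfl
  | cons d t ih =>
    intro s
    have hd : d ≠ 10 := fun hc => h (hc ▸ List.mem_cons_self)
    have ht : 10 ∉ t := fun hc => h (List.mem_cons_of_mem _ hc)
    simp [hd, ih ht]

-- leading phase: score stays 0 while 10s are consumed
theorem phase1 (l : List Int) : ∀ (b : Bool),
    l.foldl pvStepA (0, b, true) =
      (if _ : pvDropLeading10 l = [] then ((0 : Int), b, true)
       else (pvDropLeading10 l).foldl pvStepA (0, b, false)) := by
  induction l with
  | nil => simp [pvDropLeading10]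
  | cons d t ih =>
    intro b
    by_cases h : d = 10
    · simp [pvStepA, pvDropLeading10, h, ih b]
    · simp [pvDropLeading10, h, pvStepA]

theorem get_processing_score_spec_aux (l : List Int) :
    get_processing_score l = get_processing_score_alt l := by
  rw [get_processing_score_eq_foldl]
  simp only [get_processing_score_alt]
  rw [phase1 l false]
  by_cases h : pvDropLeading10 l = []
  · simp [h]
  · rw [dif_neg h, phase2]
    by_cases h10 : 10 ∈ pvDropLeading10 l
    · simp [h, h10]
    · simp [h, h10, foldl_no10 _ h10]

-- ===== VERDICT (by name: the statement is the Claim_ definition above) =====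
theorem get_processing_score_spec : Claim_equal_get_processing_score := by
  intro l _
  exact get_processing_score_spec_aux l
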